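-- pv_equiv track=rewrite | github.com/oacar/SynORFan | bioconductor.py | get_frame_mapping
-- ===== SOURCE A (Python) =====
-- def get_frame_mapping(gapped, start):
--     """
--     This function finds translation frame positions with respect to start
--     :param gapped: Bio.Seq object
--     :param start: the ATG position that is the start codon of the ORF of interest
--     :return: dictionary containing frame correspondence of each position
--     """
--     frame_mapping = {start: 0}
--     for i in range(start - 1, -1, -1):
--         if gapped[i] == '-':
--             frame_mapping[i] = frame_mapping.get(i + 1)
--         else:
--             frame_mapping[i] = (frame_mapping.get(i + 1) - 1) % 3
--     for i in range(start + 1, len(gapped), 1):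
--         if gapped[i] == '-':
--             frame_mapping[i] = frame_mapping.get(i - 1)
--         else:
--             frame_mapping[i] = (frame_mapping.get(i - 1) + 1) % 3
--     return frame_mapping
-- ===== SOURCE B (Python) =====
-- def get_frame_mapping(gapped, start):
--     """
--     This function finds translation frame positions with respect to start
--     :param gapped: Bio.Seq object
--     :param start: the ATG position that is the start codon of the ORF of interest
--     :return: dictionary containing frame correspondence of each position
--     """
--     # prefix[k] = number of non-gap characters in gapped[:k]
--     prefix = [0]
--     for c in gapped:
--         prefix.append(prefix[-1] + (c != '-'))
--     down = {i: (prefix[i] - prefix[start]) % 3 for i in range(start - 1, -1, -1)}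
--     up = {i: (prefix[i + 1] - prefix[start + 1]) % 3 for i in range(start + 1, len(gapped))}
--     return {start: 0, **down, **up}
-- ===== Notes on version B (the rewrite author's own statement) =====
-- stated objective: alternative
-- what changed: B replaces A's position-by-position recurrence (each frame derived from the previously stored dict entry, branching on gaps) by a prefix-count table of non-gap characters built in one scan, from which every position's frame is computed independently in closed form as (prefix difference) mod 3.
-- outside the precondition, e.g. on get_frame_mapping('A', -2): A returns {-2: 0, -1: 1, 0: 2}, B returns {-2: 0, -1: 2, 0: 0}
import Mathlib
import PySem

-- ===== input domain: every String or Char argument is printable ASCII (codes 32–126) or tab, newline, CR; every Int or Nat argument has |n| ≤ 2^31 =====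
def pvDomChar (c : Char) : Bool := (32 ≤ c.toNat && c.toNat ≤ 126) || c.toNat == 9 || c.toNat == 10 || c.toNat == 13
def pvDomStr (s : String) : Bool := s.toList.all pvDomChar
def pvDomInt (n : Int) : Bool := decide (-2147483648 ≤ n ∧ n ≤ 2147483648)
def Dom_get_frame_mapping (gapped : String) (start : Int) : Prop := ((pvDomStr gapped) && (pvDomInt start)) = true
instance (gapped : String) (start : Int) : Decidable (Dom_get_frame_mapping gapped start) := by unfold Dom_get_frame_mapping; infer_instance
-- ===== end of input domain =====

-- B builds a prefix-count table of non-gap characters and computes every frame independently in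
-- closed form, instead of A's entry-by-entry recurrence on the previous dict value ('alternative').

-- ===== PORT A =====
-- loop bodies of A's two for-loops (named helpers so the proofs can refer to them);
-- frame_mapping.get(i±1) always hits inside the loops (the neighbouring key was inserted
-- first), '.getD 0' only totalizes; gapped[i] out of range (IndexError, excluded by Pre_)
-- is totalized by returning d unchanged.
def pvDownStepA (gapped : String) (d : PySem.Dict Int Int) (i : Int) : PySem.Dict Int Int :=
  match PySem.Str.pyGet? gapped i with
  | some c =>
      if c = '-' then d.insert i ((d.get? (i + 1)).getD 0)
      else d.insert i (PySem.Int.mod ((d.get? (i + 1)).getD 0 - 1) 3)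
  | none => d

def pvUpStepA (gapped : String) (d : PySem.Dict Int Int) (i : Int) : PySem.Dict Int Int :=
  match PySem.Str.pyGet? gapped i with
  | some c =>
      if c = '-' then d.insert i ((d.get? (i - 1)).getD 0)
      else d.insert i (PySem.Int.mod ((d.get? (i - 1)).getD 0 + 1) 3)
  | none => d

def get_frame_mapping (gapped : String) (start : Int) : List (Int × Int) :=
  let fm0 : PySem.Dict Int Int := (PySem.Dict.empty).insert start 0
  let fm1 := (PySem.List.pyRange (start - 1) (-1) (-1)).foldl (pvDownStepA gapped) fm0
  let fm2 := (PySem.List.pyRange (start + 1) (PySem.Str.len gapped) 1).foldl (pvUpStepA gapped) fm1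
  fm2.items

-- ===== PORT B =====
-- Python's 'prefix' list is 'pref' ('prefix' is a Lean keyword); prefix[-1] → pyGetD pref (-1) 0;
-- (c != '-') used as int → if c = '-' then 0 else 1; each dict comprehension ranges over FRESH
-- pairwise-distinct keys, so its association list is the map over the range, and
-- {start: 0, **down, **up} (all keys distinct) is the concatenation.
def get_frame_mapping_alt (gapped : String) (start : Int) : List (Int × Int) :=
  let pref : List Int := gapped.toList.foldl
      (fun p c => p ++ [PySem.List.pyGetD p (-1) 0 + (if c = '-' then 0 else 1)]) [0]
  let down := (PySem.List.pyRange (start - 1) (-1) (-1)).map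
      (fun i => (i, PySem.Int.mod (PySem.List.pyGetD pref i 0 - PySem.List.pyGetD pref start 0) 3))
  let up := (PySem.List.pyRange (start + 1) (PySem.Str.len gapped) 1).map
      (fun i => (i, PySem.Int.mod (PySem.List.pyGetD pref (i + 1) 0 - PySem.List.pyGetD pref (start + 1) 0) 3))
  (start, 0) :: (down ++ up)

-- ===== PRECONDITION & SPEC =====
-- Pre_ restricts to the natural domain of the task: start is a position in the gapped sequence,
-- 0 ≤ start ≤ len(gapped). For start > len(gapped) A raises IndexError; for negative start A
-- still returns, but reads characters through Python's negative-index wraparound — an artefact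
-- of the implementation, meaningless for an ATG position (see claim.json cites).
def Pre_get_frame_mapping (gapped : String) (start : Int) : Prop :=
  0 ≤ start ∧ start ≤ (gapped.toList.length : Int)
instance (gapped : String) (start : Int) : Decidable (Pre_get_frame_mapping gapped start) := by
  unfold Pre_get_frame_mapping; infer_instance
def pvWitness_get_frame_mapping : String × Int := ("AT-G", 1)
def Spec_get_frame_mapping (gapped : String) (start : Int) (out : List (Int × Int)) : Prop := out = get_frame_mapping_alt gapped start
instance (gapped : String) (start : Int) (out : List (Int × Int)) : Decidable (Spec_get_frame_mapping gapped start out) := by unfold Spec_get_frame_mapping; infer_instance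

-- ===== CLAIM (what is proved, stated in full; the proofs are below) =====
def Claim_equal_get_frame_mapping : Prop := ∀ (gapped : String) (start : Int), Dom_get_frame_mapping gapped start → Pre_get_frame_mapping gapped start → Spec_get_frame_mapping gapped start (get_frame_mapping gapped start)

-- ===== LEMMAS AND PROOFS =====

-- number of non-gap characters among the first j characters (Python's prefix[j], 0 ≤ j ≤ len)
def pvCnt (cs : List Char) (j : Int) : Int :=
  ((cs.take j.toNat).countP (fun c => !(c == '-')) : Int)

lemma pvCnt_succ (cs : List Char) (k : Nat) (ch : Char) (h : cs[k]? = some ch) :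
    pvCnt cs ((k : Int) + 1) = pvCnt cs (k : Int) + (if ch = '-' then 0 else 1) := by
  unfold pvCnt
  have h1 : (((k : Int)) + 1).toNat = k + 1 := by omega
  have h2 : ((k : Int)).toNat = k := by omega
  rw [h1, h2, List.take_succ, h]
  rw [List.countP_append]
  by_cases hc : ch = '-'
  · simp [hc]
  · simp [hc]

lemma pvCnt_cons (c : Char) (tl : List Char) (j : Int) (h0 : 0 ≤ j) :
    pvCnt (c :: tl) (j + 1) = (if c = '-' then 0 else 1) + pvCnt tl j := by
  unfold pvCnt
  have h1 : (j + 1).toNat = j.toNat + 1 := by omega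
  rw [h1]
  by_cases hc : c = '-'
  · simp [List.countP_cons, hc]
  · simp [List.countP_cons, hc]
    push_cast
    ring

lemma pvMod_sub_one (x : Int) :
    PySem.Int.mod (PySem.Int.mod x 3 - 1) 3 = PySem.Int.mod (x - 1) 3 := by
  rw [PySem.Int.mod_eq_emod_of_pos (by norm_num), PySem.Int.mod_eq_emod_of_pos (by norm_num),
    PySem.Int.mod_eq_emod_of_pos (by norm_num)]
  omega

lemma pvMod_add_one (x : Int) :
    PySem.Int.mod (PySem.Int.mod x 3 + 1) 3 = PySem.Int.mod (x + 1) 3 := by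
  rw [PySem.Int.mod_eq_emod_of_pos (by norm_num), PySem.Int.mod_eq_emod_of_pos (by norm_num),
    PySem.Int.mod_eq_emod_of_pos (by norm_num)]
  omega

lemma pvLast_pyGetD (p : List Int) (v : Int) :
    PySem.List.pyGetD (p ++ [v]) (-1) 0 = v := by
  simp [PySem.List.pyGetD, PySem.List.pyGet?, PySem.List.pyIdx?]

-- the prefix-table fold of B, characterized
lemma pvPrefix_fold (l : List Char) (p : List Int) (v : Int) :
    l.foldl (fun p c => p ++ [PySem.List.pyGetD p (-1) 0 + (if c = '-' then 0 else 1)]) (p ++ [v])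
      = p ++ [v] ++ (List.range l.length).map (fun (k : Nat) => v + pvCnt l ((k : Int) + 1)) := by
  induction l generalizing p v with
  | nil => simp
  | cons c tl ih =>
    simp only [List.foldl_cons, pvLast_pyGetD]
    rw [ih]
    have hone : pvCnt (c :: tl) 1 = (if c = '-' then 0 else 1) := by
      by_cases hc : c = '-' <;> simp [pvCnt, List.countP_cons, hc]
    have htail : (List.range tl.length).map
          ((fun (k : Nat) => v + pvCnt (c :: tl) ((k : Int) + 1)) ∘ Nat.succ)
        = (List.range tl.length).map
          (fun (k : Nat) => v + (if c = '-' then 0 else 1) + pvCnt tl ((k : Int) + 1)) := by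
      apply List.map_congr_left
      intro k _
      simp only [Function.comp]
      have e : ((Nat.succ k : Nat) : Int) + 1 = ((k : Int) + 1) + 1 := by push_cast; ring
      rw [e, pvCnt_cons c tl ((k : Int) + 1) (by omega)]
      ring
    simp only [List.length_cons, List.range_succ_eq_map, List.map_cons, List.map_map,
      Nat.cast_zero, zero_add]
    rw [htail]
    simp [List.append_assoc, hone]

lemma pvPrefix_getD (cs : List Char) (j : Int) (h0 : 0 ≤ j) (hj : j ≤ (cs.length : Int)) :
    PySem.List.pyGetD
      (cs.foldl (fun p c => p ++ [PySem.List.pyGetD p (-1) 0 + (if c = '-' then 0 else 1)]) [0]) j 0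
      = pvCnt cs j := by
  rw [show ([(0 : Int)] = [] ++ [(0 : Int)]) from rfl, pvPrefix_fold]
  rw [PySem.List.pyGetD_of_nonneg _ _ h0]
  simp only [List.nil_append]
  rcases Nat.eq_zero_or_pos j.toNat with hz | hp
  · rw [hz]
    simp [pvCnt, hz]
  · obtain ⟨k, hk⟩ : ∃ k, j.toNat = k + 1 := ⟨j.toNat - 1, by omega⟩
    have hklt : k < cs.length := by omega
    rw [hk]
    have hcons : ([(0 : Int)] ++ (List.range cs.length).map (fun (k : Nat) => 0 + pvCnt cs ((k : Int) + 1)))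
        = (0 : Int) :: (List.range cs.length).map (fun (k : Nat) => 0 + pvCnt cs ((k : Int) + 1)) := rfl
    rw [hcons, List.getD_cons_succ]
    rw [List.getD_eq_getElem _ _ (by simpa using hklt)]
    simp only [List.getElem_map, List.getElem_range]
    rw [show ((k : Int) + 1) = j from by omega]
    ring

-- A's downward loop: folding over [t-1, …, 0] appends the closed-form entries
lemma pvDown_fold (gapped : String) (s : Int) (hs : s ≤ (gapped.toList.length : Int)) :
    ∀ (t : Nat), (t : Int) ≤ s → ∀ (d : PySem.Dict Int Int),
      d.get? (t : Int) = some (PySem.Int.mod (pvCnt gapped.toList (t : Int) - pvCnt gapped.toList s) 3) →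
      (∀ k ∈ d.keys, (t : Int) ≤ k) →
      ((PySem.List.pyRange ((t : Int) - 1) (-1) (-1)).foldl (pvDownStepA gapped) d).items
        = d.items ++ (List.range t).map (fun (k : Nat) =>
            ((t : Int) - 1 - (k : Int), PySem.Int.mod (pvCnt gapped.toList ((t : Int) - 1 - (k : Int)) - pvCnt gapped.toList s) 3)) := by
  intro t
  induction t with
  | zero =>
    intro _ d _ _
    rw [show ((0 : Nat) : Int) - 1 = -1 from by norm_num,
      PySem.List.pyRange_neg_one_eq_nil le_rfl]
    simp
  | succ t ih =>
    intro hts d hget hkeys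
    have e1 : ((t + 1 : Nat) : Int) - 1 = (t : Int) := by push_cast; ring
    rw [e1, PySem.List.pyRange_neg_one_cons (by omega : (-1 : Int) < (t : Int)), List.foldl_cons]
    have htn : t < gapped.toList.length := by omega
    have hgetc : gapped.toList[t]? = some (gapped.toList[t]'htn) := List.getElem?_eq_getElem htn
    have hchar : PySem.Str.pyGet? gapped (t : Int) = some (gapped.toList[t]'htn) := by
      rw [PySem.Str.pyGet?_natCast, hgetc]
    have hstep := pvCnt_succ gapped.toList t _ hgetc
    have hg1 : d.get? ((t : Int) + 1)
        = some (PySem.Int.mod (pvCnt gapped.toList ((t : Int) + 1) - pvCnt gapped.toList s) 3) := by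
      rw [show ((t : Int) + 1) = ((t + 1 : Nat) : Int) from by push_cast; ring]
      exact hget
    have hcont : d.contains (t : Int) = false := by
      cases hc : d.contains (t : Int)
      · rfl
      · exfalso
        have hmem := (PySem.Dict.contains_iff_mem_keys d _).mp hc
        have := hkeys _ hmem
        omega
    have hval :
        (if (gapped.toList[t]'htn) = '-' then (d.get? ((t : Int) + 1)).getD 0
          else PySem.Int.mod ((d.get? ((t : Int) + 1)).getD 0 - 1) 3)
        = PySem.Int.mod (pvCnt gapped.toList (t : Int) - pvCnt gapped.toList s) 3 := by
      by_cases hc : (gapped.toList[t]'htn) = '-'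
      · rw [if_pos hc, hg1]
        simp only [Option.getD_some]
        rw [hstep, if_pos hc]
        norm_num
      · rw [if_neg hc, hg1]
        simp only [Option.getD_some]
        rw [pvMod_sub_one]
        congr 1
        rw [hstep, if_neg hc]
        ring
    have hstepdict : pvDownStepA gapped d (t : Int)
        = d.insert (t : Int) (PySem.Int.mod (pvCnt gapped.toList (t : Int) - pvCnt gapped.toList s) 3) := by
      unfold pvDownStepA
      rw [hchar, ← hval]
      by_cases hc : (gapped.toList[t]'htn) = '-' <;> simp [hc]
    rw [hstepdict]
    rw [ih (by omega) _
      (by rw [PySem.Dict.get?_insert_self])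
      (by
        intro k hmem
        rw [PySem.Dict.keys_insert_of_not_contains d _ hcont] at hmem
        rcases List.mem_append.mp hmem with hmem | hmem
        · have := hkeys _ hmem
          push_cast at this ⊢
          omega
        · simp at hmem
          omega)]
    rw [PySem.Dict.items_insert_of_not_contains d _ hcont]
    have hfix : (List.range (t + 1)).map (fun (k : Nat) => ((t : Int) - (k : Int),
          PySem.Int.mod (pvCnt gapped.toList ((t : Int) - (k : Int)) - pvCnt gapped.toList s) 3))
        = ((t : Int), PySem.Int.mod (pvCnt gapped.toList (t : Int) - pvCnt gapped.toList s) 3)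
          :: (List.range t).map (fun (k : Nat) => ((t : Int) - 1 - (k : Int),
            PySem.Int.mod (pvCnt gapped.toList ((t : Int) - 1 - (k : Int)) - pvCnt gapped.toList s) 3)) := by
      simp only [List.range_succ_eq_map, List.map_cons, List.map_map, Nat.cast_zero, sub_zero]
      congr 1
      apply List.map_congr_left
      intro k _
      simp only [Function.comp]
      have e : (t : Int) - ((Nat.succ k : Nat) : Int) = (t : Int) - 1 - (k : Int) := by
        push_cast; ring
      rw [e]
    rw [hfix]
    simp [List.append_assoc]

-- A's upward loop: folding over [a, …, n-1] appends the closed-form entries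
lemma pvUp_fold (gapped : String) (s : Int) (hs0 : 0 ≤ s) :
    ∀ (u : Nat) (a : Int), a = (gapped.toList.length : Int) - u → s + 1 ≤ a →
      ∀ (d : PySem.Dict Int Int),
      d.get? (a - 1) = some (PySem.Int.mod (pvCnt gapped.toList a - pvCnt gapped.toList (s + 1)) 3) →
      (∀ k ∈ d.keys, k < a) →
      ((PySem.List.pyRange a ((gapped.toList.length : Int)) 1).foldl (pvUpStepA gapped) d).items
        = d.items ++ (PySem.List.pyRange a ((gapped.toList.length : Int)) 1).map (fun i =>
            (i, PySem.Int.mod (pvCnt gapped.toList (i + 1) - pvCnt gapped.toList (s + 1)) 3)) := by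
  intro u
  induction u with
  | zero =>
    intro a ha _ d _ _
    rw [show a = ((gapped.toList.length : Nat) : Int) from by omega,
      PySem.List.pyRange_one_eq_nil le_rfl]
    simp
  | succ u ih =>
    intro a ha hsa d hget hkeys
    have han : a < (gapped.toList.length : Int) := by omega
    have ha0 : 0 ≤ a := by omega
    have hantn : a.toNat < gapped.toList.length := by omega
    rw [PySem.List.pyRange_one_cons han, List.foldl_cons]
    have hgetc : gapped.toList[a.toNat]? = some (gapped.toList[a.toNat]'hantn) :=
      List.getElem?_eq_getElem hantn
    have hchar : PySem.Str.pyGet? gapped a = some (gapped.toList[a.toNat]'hantn) := by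
      conv_lhs => rw [show a = ((a.toNat : Nat) : Int) from by omega]
      rw [PySem.Str.pyGet?_natCast, hgetc]
    have hstep := pvCnt_succ gapped.toList a.toNat _ hgetc
    rw [show ((a.toNat : Nat) : Int) = a from by omega] at hstep
    have hcont : d.contains a = false := by
      cases hc : d.contains a
      · rfl
      · exfalso
        have hmem := (PySem.Dict.contains_iff_mem_keys d _).mp hc
        have := hkeys _ hmem
        omega
    have hval :
        (if (gapped.toList[a.toNat]'hantn) = '-' then (d.get? (a - 1)).getD 0
          else PySem.Int.mod ((d.get? (a - 1)).getD 0 + 1) 3)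
        = PySem.Int.mod (pvCnt gapped.toList (a + 1) - pvCnt gapped.toList (s + 1)) 3 := by
      by_cases hc : (gapped.toList[a.toNat]'hantn) = '-'
      · rw [if_pos hc, hget]
        simp only [Option.getD_some]
        rw [hstep, if_pos hc]
        norm_num
      · rw [if_neg hc, hget]
        simp only [Option.getD_some]
        rw [pvMod_add_one]
        congr 1
        rw [hstep, if_neg hc]
        ring
    have hstepdict : pvUpStepA gapped d a
        = d.insert a (PySem.Int.mod (pvCnt gapped.toList (a + 1) - pvCnt gapped.toList (s + 1)) 3) := by
      unfold pvUpStepA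
      rw [hchar, ← hval]
      by_cases hc : (gapped.toList[a.toNat]'hantn) = '-' <;> simp [hc]
    rw [hstepdict]
    rw [ih (a + 1) (by omega) (by omega) _
      (by rw [show a + 1 - 1 = a from by ring, PySem.Dict.get?_insert_self])
      (by
        intro k hmem
        rw [PySem.Dict.keys_insert_of_not_contains d _ hcont] at hmem
        rcases List.mem_append.mp hmem with hmem | hmem
        · have := hkeys _ hmem
          omega
        · simp at hmem
          omega)]
    rw [PySem.Dict.items_insert_of_not_contains d _ hcont]
    simp [List.append_assoc]

-- B's down comprehension equals A's down entries
lemma pvDownB_eq (gapped : String) (start : Int) (hs0 : 0 ≤ start) (hsn : start ≤ (gapped.toList.length : Int)) :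
    (PySem.List.pyRange (start - 1) (-1) (-1)).map
      (fun i => (i, PySem.Int.mod
        (PySem.List.pyGetD (gapped.toList.foldl (fun p c => p ++ [PySem.List.pyGetD p (-1) 0 + (if c = '-' then 0 else 1)]) [0]) i 0
          - PySem.List.pyGetD (gapped.toList.foldl (fun p c => p ++ [PySem.List.pyGetD p (-1) 0 + (if c = '-' then 0 else 1)]) [0]) start 0) 3))
    = (List.range start.toNat).map (fun (k : Nat) =>
        (start - 1 - (k : Int), PySem.Int.mod (pvCnt gapped.toList (start - 1 - (k : Int)) - pvCnt gapped.toList start) 3)) := by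
  rw [PySem.List.pyRange_neg_one]
  have hcount : (start - 1 - (-1)).toNat = start.toNat := by omega
  rw [hcount, List.map_map]
  apply List.map_congr_left
  intro k hk
  rw [List.mem_range] at hk
  simp only [Function.comp]
  rw [pvPrefix_getD gapped.toList (start - 1 - (k : Int)) (by omega) (by omega),
    pvPrefix_getD gapped.toList start (by omega) (by omega)]

-- B's up comprehension equals A's up entries
lemma pvUpB_eq (gapped : String) (start : Int) (hs0 : 0 ≤ start) :
    (PySem.List.pyRange (start + 1) ((gapped.toList.length : Int)) 1).map
      (fun i => (i, PySem.Int.mod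
        (PySem.List.pyGetD (gapped.toList.foldl (fun p c => p ++ [PySem.List.pyGetD p (-1) 0 + (if c = '-' then 0 else 1)]) [0]) (i + 1) 0
          - PySem.List.pyGetD (gapped.toList.foldl (fun p c => p ++ [PySem.List.pyGetD p (-1) 0 + (if c = '-' then 0 else 1)]) [0]) (start + 1) 0) 3))
    = (PySem.List.pyRange (start + 1) ((gapped.toList.length : Int)) 1).map (fun i =>
        (i, PySem.Int.mod (pvCnt gapped.toList (i + 1) - pvCnt gapped.toList (start + 1)) 3)) := by
  apply List.map_congr_left
  intro i hi
  rw [PySem.List.mem_pyRange_one] at hi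
  rw [pvPrefix_getD gapped.toList (i + 1) (by omega) (by omega),
    pvPrefix_getD gapped.toList (start + 1) (by omega) (by omega)]

-- ===== VERDICT (by name: the statement is the Claim_ definition above) =====
theorem get_frame_mapping_spec : Claim_equal_get_frame_mapping := by
  intro gapped start _ hpre
  obtain ⟨hs0, hsn⟩ := hpre
  have hstart : ((start.toNat : Nat) : Int) = start := by omega
  have hmod0 : PySem.Int.mod 0 3 = 0 := by decide
  have hlen : PySem.Str.len gapped = (gapped.toList.length : Int) := by
    simp [pysem]
  unfold Spec_get_frame_mapping get_frame_mapping get_frame_mapping_alt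
  dsimp only
  have hdown := pvDown_fold gapped start hsn start.toNat (by omega)
      ((PySem.Dict.empty).insert start 0)
      (by rw [hstart, PySem.Dict.get?_insert_self, sub_self, hmod0])
      (by
        intro k hk
        rw [PySem.Dict.keys_insert_of_not_contains _ _ (by simp)] at hk
        have hke : (PySem.Dict.empty : PySem.Dict Int Int).keys = [] := rfl
        rw [hke] at hk
        simp at hk
        omega)
  rw [hstart] at hdown
  rw [PySem.Dict.items_insert_of_not_contains _ _ (by simp)] at hdown
  have hemp : (PySem.Dict.empty : PySem.Dict Int Int).items = [] := rfl
  rw [hemp] at hdown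
  simp only [List.nil_append] at hdown
  have hd1mk : (PySem.List.pyRange (start - 1) (-1) (-1)).foldl (pvDownStepA gapped)
        ((PySem.Dict.empty).insert start 0)
      = PySem.Dict.mk ((start, 0) :: (List.range start.toNat).map (fun (k : Nat) =>
          (start - 1 - (k : Int), PySem.Int.mod (pvCnt gapped.toList (start - 1 - (k : Int)) - pvCnt gapped.toList start) 3))) := by
    apply PySem.Dict.ext
    rw [hdown]
    rfl
  rw [hd1mk, hlen]
  by_cases hcase : start + 1 ≤ (gapped.toList.length : Int)
  · have hup := pvUp_fold gapped start hs0 ((gapped.toList.length : Int) - (start + 1)).toNat (start + 1)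
        (by omega) (by omega)
        (PySem.Dict.mk ((start, 0) :: (List.range start.toNat).map (fun (k : Nat) =>
          (start - 1 - (k : Int), PySem.Int.mod (pvCnt gapped.toList (start - 1 - (k : Int)) - pvCnt gapped.toList start) 3))))
        (by
          rw [show start + 1 - 1 = start from by ring, PySem.Dict.get?_mk_cons]
          rw [sub_self, hmod0]
          simp)
        (by
          intro k hk
          rw [PySem.Dict.keys_mk] at hk
          simp only [List.map_cons, List.map_map, List.mem_cons, List.mem_map, List.mem_range,
            Function.comp] at hk
          rcases hk with hk | ⟨kk, hkk, hk⟩ <;> omega)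
    rw [hup]
    rw [pvUpB_eq gapped start hs0, pvDownB_eq gapped start hs0 hsn]
    simp
  · have hempty : PySem.List.pyRange (start + 1) ((gapped.toList.length : Int)) 1 = [] :=
      PySem.List.pyRange_one_eq_nil (by omega)
    rw [hempty]
    simp only [List.foldl_nil, List.map_nil, List.append_nil]
    rw [pvDownB_eq gapped start hs0 hsn]
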